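-- pv_equiv track=rewrite | github.com/Gabriel-Bastos-Rabelo/marathon-training | binary search/lastSoldier.py | lastSoldier
-- ===== SOURCE A (Python) =====
-- def lastSoldier(row):
--     last = -1
--     l = 0
--     r = len(row) - 1
--     target = 1
--     while(l <= r):
--         mid = l + (r - l)//2
--         if(target > row[mid]):
--             r = mid -1
--         elif (target == row[mid]):
--             l = mid + 1
--             last = mid
--
--     return last+1
-- ===== SOURCE B (Python) =====
-- def lastSoldier(row):
--     def go(l, r, last):
--         if l > r:
--             return last + 1
--         mid = l + (r - l) // 2
--         if row[mid] < 1: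
--             return go(l, mid - 1, last)
--         return go(mid + 1, r, mid)
--     return go(0, len(row) - 1, -1)
-- ===== Notes on version B (the rewrite author's own statement) =====
-- stated objective: alternative
-- what changed: The iterative while-loop binary search with mutable l/r/last state is re-decomposed as a recursive helper go(l, r, last) with an explicit two-way comparison (row[mid] < 1 goes left, otherwise go right recording mid), returning last+1 at the base case.
-- outside the precondition, e.g. on lastSoldier([0, 2]): A returns 0, B returns 0
import Mathlib
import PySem

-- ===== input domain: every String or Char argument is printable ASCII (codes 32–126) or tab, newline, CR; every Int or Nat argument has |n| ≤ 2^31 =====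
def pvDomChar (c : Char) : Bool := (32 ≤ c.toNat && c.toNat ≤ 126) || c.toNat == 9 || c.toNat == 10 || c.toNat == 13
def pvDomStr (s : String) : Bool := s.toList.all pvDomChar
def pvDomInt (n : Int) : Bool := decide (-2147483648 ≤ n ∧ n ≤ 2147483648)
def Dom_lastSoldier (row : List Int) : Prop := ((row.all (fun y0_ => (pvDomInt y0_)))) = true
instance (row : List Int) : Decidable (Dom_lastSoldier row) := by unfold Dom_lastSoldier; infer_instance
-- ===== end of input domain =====

-- B re-decomposes A's iterative while-loop binary search as a recursive helper; return values agree on Pre_.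

-- ===== PORT A =====
-- A's while loop, ported with fuel (each terminating iteration shrinks the interval, so
-- row.length + 1 units of fuel are never exhausted under Pre_; the fuel-0 and the
-- row[mid] > 1 fall-through — where Python A loops forever — lie outside Pre_).
def lastSoldierLoop (row : List Int) : Nat → Int → Int → Int → Int
  | 0, _l, _r, last => last + 1
  | fuel+1, l, r, last =>
    if l ≤ r then
      let mid := l + PySem.Int.floordiv (r - l) 2
      match PySem.List.pyGet? row mid with
      | none => last + 1          -- IndexError: unreachable from the initial bounds
      | some v =>
        if 1 > v then lastSoldierLoop row fuel l (mid - 1) last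
        else if 1 = v then lastSoldierLoop row fuel (mid + 1) r mid
        else last + 1             -- Python A makes no progress here (diverges); outside Pre_
    else last + 1

def lastSoldier (row : List Int) : Int :=
  lastSoldierLoop row (row.length + 1) 0 ((row.length : Int) - 1) (-1)

-- ===== PORT B =====
def lastSoldierGo (row : List Int) (l r last : Int) : Int :=
  if l > r then last + 1
  else
    match PySem.List.pyGet? row (l + PySem.Int.floordiv (r - l) 2) with
    | none => last + 1            -- IndexError: unreachable from the initial bounds
    | some v =>
      if v < 1 then lastSoldierGo row l (l + PySem.Int.floordiv (r - l) 2 - 1) last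
      else lastSoldierGo row (l + PySem.Int.floordiv (r - l) 2 + 1) r (l + PySem.Int.floordiv (r - l) 2)
termination_by (r + 1 - l).toNat
decreasing_by
  all_goals
    rw [PySem.Int.floordiv_eq_ediv_of_pos (by norm_num)] at *
    omega

def lastSoldier_alt (row : List Int) : Int :=
  lastSoldierGo row 0 ((row.length : Int) - 1) (-1)

-- ===== PRECONDITION & SPEC =====
-- Pre_ excludes rows containing an element greater than 1: when A's binary search probes such
-- an element neither branch fires and the while loop diverges.  (A does still return on some
-- such rows — when no element > 1 is ever probed — and B agrees with A there too, but that
-- termination set is path-dependent and has no closed form; Pre_ keeps the natural 0/1 domain.)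
def Pre_lastSoldier (row : List Int) : Prop := ∀ x ∈ row, x ≤ 1
instance (row : List Int) : Decidable (Pre_lastSoldier row) := by unfold Pre_lastSoldier; infer_instance
def pvWitness_lastSoldier : List Int := [1, 1, 1, 0, 0]
def Spec_lastSoldier (row : List Int) (out : Int) : Prop := out = lastSoldier_alt row
instance (row : List Int) (out : Int) : Decidable (Spec_lastSoldier row out) := by unfold Spec_lastSoldier; infer_instance

-- ===== CLAIM (what is proved, stated in full; the proofs are below) =====
def Claim_equal_lastSoldier : Prop := ∀ (row : List Int), Dom_lastSoldier row → Pre_lastSoldier row → Spec_lastSoldier row (lastSoldier row)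

-- ===== LEMMAS AND PROOFS =====

lemma lastSoldierLoop_eq_go (row : List Int) (hrow : ∀ x ∈ row, x ≤ 1) :
    ∀ (fuel : Nat) (l r last : Int), (r + 1 - l).toNat ≤ fuel →
      lastSoldierLoop row fuel l r last = lastSoldierGo row l r last := by
  intro fuel
  induction fuel with
  | zero =>
    intro l r last h
    rw [lastSoldierGo]
    have : l > r := by omega
    simp [lastSoldierLoop, this]
  | succ n ih =>
    intro l r last h
    rw [lastSoldierGo]
    by_cases hlr : l ≤ r
    · have hmid : PySem.Int.floordiv (r - l) 2 = (r - l) / 2 :=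
        PySem.Int.floordiv_eq_ediv_of_pos (by norm_num)
      simp only [lastSoldierLoop, if_pos hlr, if_neg (not_lt.mpr hlr)]
      cases hg : PySem.List.pyGet? row (l + PySem.Int.floordiv (r - l) 2) with
      | none => rfl
      | some v =>
        have hv : v ≤ 1 := hrow v (PySem.List.mem_of_pyGet?_eq_some row hg)
        by_cases hv1 : v < 1
        · simp only [if_pos hv1]
          exact ih _ _ _ (by rw [hmid] at *; omega)
        · have : (1 : Int) = v := by omega
          simp only [if_neg hv1, if_pos this]
          exact ih _ _ _ (by rw [hmid] at *; omega)
    · simp [lastSoldierLoop, hlr, not_le.mp hlr]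

-- ===== VERDICT (by name: the statement is the Claim_ definition above) =====
theorem lastSoldier_spec : Claim_equal_lastSoldier := by
  intro row _dom hpre
  unfold Spec_lastSoldier lastSoldier lastSoldier_alt
  exact lastSoldierLoop_eq_go row hpre _ 0 _ (-1) (by omega)
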